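-- pv_equiv track=rewrite | github.com/wanawin/startswith025 | core025_ranked_playlist_app_FIXED30_cached_downloads.py | seed_has_worstpair_025
-- ===== SOURCE A (Python) =====
-- WORST_PAIRS_025 = {("3","9"), ("5","5"), ("2","6"), ("2","9"), ("7","9")}
--
-- def seed_has_worstpair_025(seed4: str) -> bool:
--     # unordered digit pairs from 4 digits (6 combos)
--     digs = list(seed4)
--     pairs = []
--     for i in range(4):
--         for j in range(i+1,4):
--             a,b = digs[i], digs[j]
--             pairs.append(tuple(sorted((a,b))))
--     return any(p in WORST_PAIRS_025 for p in pairs)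
-- ===== SOURCE B (Python) =====
-- WORST_PAIRS_025 = [("3", "9"), ("5", "5"), ("2", "6"), ("2", "9"), ("7", "9")]
--
-- def seed_has_worstpair_025(seed4: str) -> bool:
--     # probe the worst-pair table against the first four digits instead of
--     # enumerating the seed's six unordered pairs
--     digs = [seed4[0], seed4[1], seed4[2], seed4[3]]
--     for x, y in WORST_PAIRS_025:
--         if x == y:
--             if digs.count(x) >= 2:
--                 return True
--         elif x in digs and y in digs:
--             return True
--     return False
-- ===== Notes on version B (the rewrite author's own statement) =====
-- stated objective: alternative
-- what changed: Instead of enumerating the seed's six unordered digit pairs and testing each for membership in the worst-pair set, B extracts the four digits positionally and probes each worst-pair table entry against them (presence of both digits for distinct pairs, multiplicity >= 2 for the ('5','5') pair), reversing the traversal direction.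
import Mathlib
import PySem

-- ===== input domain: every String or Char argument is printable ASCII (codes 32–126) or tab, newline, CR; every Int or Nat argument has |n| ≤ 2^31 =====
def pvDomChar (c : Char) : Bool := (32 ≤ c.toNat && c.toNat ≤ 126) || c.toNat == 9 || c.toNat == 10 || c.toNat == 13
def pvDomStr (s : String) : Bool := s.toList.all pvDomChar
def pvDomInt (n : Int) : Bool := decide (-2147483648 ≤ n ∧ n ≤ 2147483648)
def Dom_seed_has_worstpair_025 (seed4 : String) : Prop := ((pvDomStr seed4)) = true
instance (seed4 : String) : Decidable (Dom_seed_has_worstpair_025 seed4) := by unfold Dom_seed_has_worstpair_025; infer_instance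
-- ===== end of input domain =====

-- B probes the 5-entry worst-pair table against the first four digits (presence / multiplicity
-- tests) instead of enumerating the seed's six unordered pairs; objective: alternative decomposition.
-- Both Pythons raise IndexError for len(seed4) < 4; those inputs are outside Pre_.

-- ===== PORT A =====
def worstPairs025 : List (Char × Char) := [('3','9'), ('5','5'), ('2','6'), ('2','9'), ('7','9')]

-- tuple(sorted((a,b))) on a 2-tuple
def pvSort2 (a b : Char) : Char × Char := if b < a then (b, a) else (a, b)

def seed_has_worstpair_025 (seed4 : String) : Bool :=
  let digs := seed4.toList
  let pairs : List (Char × Char) :=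
    (PySem.List.pyRange 0 4 1).foldl (fun acc i =>
      (PySem.List.pyRange (i+1) 4 1).foldl (fun acc j =>
        let a := PySem.List.pyGetD digs i ' '   -- in range under Pre_
        let b := PySem.List.pyGetD digs j ' '
        acc ++ [pvSort2 a b]) acc) []
  pairs.any (fun p => worstPairs025.contains p)

-- ===== PORT B =====
def seed_has_worstpair_025_alt (seed4 : String) : Bool :=
  let l := seed4.toList
  let digs : List Char :=
    [PySem.List.pyGetD l 0 ' ', PySem.List.pyGetD l 1 ' ',
     PySem.List.pyGetD l 2 ' ', PySem.List.pyGetD l 3 ' ']   -- in range under Pre_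
  worstPairs025.any (fun p =>
    if p.1 == p.2 then decide (2 ≤ PySem.List.count digs p.1)
    else digs.contains p.1 && digs.contains p.2)

-- ===== PRECONDITION & SPEC =====
-- A raises IndexError (and B too) when the seed has fewer than four characters.
def Pre_seed_has_worstpair_025 (seed4 : String) : Prop := 4 ≤ seed4.toList.length
instance (seed4 : String) : Decidable (Pre_seed_has_worstpair_025 seed4) := by
  unfold Pre_seed_has_worstpair_025; infer_instance
def pvWitness_seed_has_worstpair_025 : String := "1234"

def Spec_seed_has_worstpair_025 (seed4 : String) (out : Bool) : Prop := out = seed_has_worstpair_025_alt seed4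
instance (seed4 : String) (out : Bool) : Decidable (Spec_seed_has_worstpair_025 seed4 out) := by unfold Spec_seed_has_worstpair_025; infer_instance

-- ===== CLAIM (what is proved, stated in full; the proofs are below) =====
def Claim_equal_seed_has_worstpair_025 : Prop := ∀ (seed4 : String), Dom_seed_has_worstpair_025 seed4 → Pre_seed_has_worstpair_025 seed4 → Spec_seed_has_worstpair_025 seed4 (seed_has_worstpair_025 seed4)

-- ===== LEMMAS AND PROOFS =====

-- sorted pair equals an ordered pair (x,y), x < y, iff the two elements are x and y
lemma pvSort2_eq_of_lt (u v x y : Char) (hxy : x < y) :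
    pvSort2 u v = (x, y) ↔ (u = x ∧ v = y) ∨ (u = y ∧ v = x) := by
  unfold pvSort2
  split_ifs with h
  all_goals simp only [Prod.mk.injEq]
  all_goals constructor
  · rintro ⟨rfl, rfl⟩; exact Or.inr ⟨rfl, rfl⟩
  · rintro (⟨rfl, rfl⟩ | ⟨rfl, rfl⟩)
    · exact absurd h (not_lt.mpr hxy.le)
    · exact ⟨rfl, rfl⟩
  · rintro ⟨rfl, rfl⟩; exact Or.inl ⟨rfl, rfl⟩
  · rintro (⟨rfl, rfl⟩ | ⟨rfl, rfl⟩)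
    · exact ⟨rfl, rfl⟩
    · exact absurd hxy (not_lt.mpr (not_lt.mp h))

lemma pvSort2_eq_diag (u v x : Char) : pvSort2 u v = (x, x) ↔ u = x ∧ v = x := by
  unfold pvSort2; split_ifs <;> simp only [Prod.mk.injEq] <;> constructor <;>
    rintro ⟨rfl, rfl⟩ <;> exact ⟨rfl, rfl⟩

-- some unordered pair of the four digits is {x,y} (x < y) iff x and y both occur
set_option maxHeartbeats 1000000 in
lemma pair_hit (x y : Char) (hxy : x < y) (a b c d : Char) :
    (pvSort2 a b = (x,y) ∨ pvSort2 a c = (x,y) ∨ pvSort2 a d = (x,y) ∨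
     pvSort2 b c = (x,y) ∨ pvSort2 b d = (x,y) ∨ pvSort2 c d = (x,y)) ↔
    ((x = a ∨ x = b ∨ x = c ∨ x = d) ∧ (y = a ∨ y = b ∨ y = c ∨ y = d)) := by
  simp only [pvSort2_eq_of_lt _ _ _ _ hxy]
  constructor
  · rintro (h|h|h|h|h|h) <;> rcases h with ⟨rfl, rfl⟩ | ⟨rfl, rfl⟩ <;> tauto
  · rintro ⟨hx, hy⟩
    rcases hx with rfl|rfl|rfl|rfl <;> rcases hy with rfl|rfl|rfl|rfl <;>
      first
        | (exact absurd hxy (lt_irrefl _))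
        | tauto

-- some unordered pair of the four digits is {x,x} iff x occurs at least twice
lemma pair_hit_diag (x a b c d : Char) :
    (pvSort2 a b = (x,x) ∨ pvSort2 a c = (x,x) ∨ pvSort2 a d = (x,x) ∨
     pvSort2 b c = (x,x) ∨ pvSort2 b d = (x,x) ∨ pvSort2 c d = (x,x)) ↔
    2 ≤ PySem.List.count [a, b, c, d] x := by
  simp only [pvSort2_eq_diag]
  by_cases ha : a = x <;> by_cases hb : b = x <;> by_cases hc : c = x <;> by_cases hd : d = x <;>
    simp_all [PySem.List.count]

theorem seed_has_worstpair_025_spec : Claim_equal_seed_has_worstpair_025 := by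
  intro seed4 _ hpre
  unfold Spec_seed_has_worstpair_025
  unfold Pre_seed_has_worstpair_025 at hpre
  rcases hl : seed4.toList with _ | ⟨a, _ | ⟨b, _ | ⟨c, _ | ⟨d, t⟩⟩⟩⟩ <;>
    rw [hl] at hpre <;> simp at hpre
  have e0 : PySem.List.pyGetD (a::b::c::d::t) (0:Int) ' ' = a := by
    rw [PySem.List.pyGetD_eq_getElem] <;> (simp; try omega)
  have e1 : PySem.List.pyGetD (a::b::c::d::t) (1:Int) ' ' = b := by
    rw [PySem.List.pyGetD_eq_getElem] <;> (simp; try omega)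
  have e2 : PySem.List.pyGetD (a::b::c::d::t) (2:Int) ' ' = c := by
    rw [PySem.List.pyGetD_eq_getElem] <;> (simp; try omega)
  have e3 : PySem.List.pyGetD (a::b::c::d::t) (3:Int) ' ' = d := by
    rw [PySem.List.pyGetD_eq_getElem] <;> (simp; try omega)
  unfold seed_has_worstpair_025 seed_has_worstpair_025_alt
  rw [hl]
  simp only [show PySem.List.pyRange 0 4 1 = [0,1,2,3] from by decide]
  simp only [List.foldl]
  norm_num
  simp only [show PySem.List.pyRange 1 4 1 = [1,2,3] from by decide,
    show PySem.List.pyRange 2 4 1 = [2,3] from by decide,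
    show PySem.List.pyRange 3 4 1 = [3] from by decide]
  simp only [List.any_cons, List.any_nil, Function.comp_apply, e1, e2, e3, Bool.or_false]
  rw [Bool.eq_iff_iff]
  have h39 := pair_hit '3' '9' (by decide) a b c d
  have h26 := pair_hit '2' '6' (by decide) a b c d
  have h29 := pair_hit '2' '9' (by decide) a b c d
  have h79 := pair_hit '7' '9' (by decide) a b c d
  have h55 := pair_hit_diag '5' a b c d
  simp only [PySem.List.count] at h55
  simp only [worstPairs025, worstPairs025, List.any_cons, List.any_nil, List.mem_cons,
    List.not_mem_nil, or_false, Bool.or_eq_true, decide_eq_true_eq, if_true]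
  rw [if_neg (by decide), if_neg (by decide), if_neg (by decide), if_neg (by decide)]
  simp only [Bool.or_eq_true, Bool.and_eq_true, decide_eq_true_eq, Bool.false_eq_true, or_false]
  rw [← h39, ← h55, ← h26, ← h29, ← h79]
  constructor <;> intro h <;> simp only [or_assoc] at h ⊢ <;>
    rcases h with h|h|h|h|h|h|h|h|h|h|h|h|h|h|h|h|h|h|h|h|h|h|h|h|h|h|h|h|h|h <;> simp [h]
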